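-- pv_equiv track=rewrite | github.com/marshallmcdonnell/journals | journals/databases/icat/sns/interface.py | _hyphen_range
-- ===== SOURCE A (Python) =====
-- def _hyphen_range(s):
--     """ Takes a range in form of "a-b" and generate a list of numbers between a and b inclusive.
--     Also accepts comma separated ranges like "a-b,c-d,f" will build a list which will include
--     Numbers from a to b, a to d and f"""
--     s = "".join(s.split())  # removes white space
--     r = set()
--     for x in s.split(','):
--         t = x.split('-')
--         if len(t) not in [1, 2]:
--             logger.error("hash_range is given its arguement as " + s + " which seems not correctly formated.")
--         r.add(int(t[0])) if len(t) == 1 else r.update(set(range(int(t[0]), int(t[1]) + 1)))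
--     l = list(r)
--     l.sort()
--     l_in_str = ','.join(str(x) for x in l)
--     return l_in_str
-- ===== SOURCE B (Python) =====
-- def _hyphen_range(s):
--     """Interval version: parse tokens to (lo, hi) intervals, sort by start, merge
--     overlapping/adjacent intervals in one pass, then emit each merged run directly
--     (no set, no number-level sort)."""
--     s = "".join(s.split())  # removes white space
--     ivs = []
--     for x in s.split(','):
--         t = x.split('-')
--         if len(t) == 1:
--             a = int(t[0])
--             ivs.append((a, a))
--         else:
--             ivs.append((int(t[0]), int(t[1])))
--     ivs.sort(key=lambda p: p[0])
--     merged, cur = [], None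
--     for a, b in ivs:
--         if b < a:
--             continue  # empty range, like range(a, b + 1)
--         if cur is None:
--             cur = (a, b)
--         elif a <= cur[1] + 1:
--             if cur[1] < b:
--                 cur = (cur[0], b)
--         else:
--             merged.append(cur)
--             cur = (a, b)
--     if cur is not None:
--         merged.append(cur)
--     return ','.join(str(n) for lo, hi in merged for n in range(lo, hi + 1))
-- ===== Notes on version B (the rewrite author's own statement) =====
-- stated objective: alternative
-- what changed: Instead of pouring every expanded number into a set and sorting the set, B parses each token into an (lo,hi) interval, sorts the intervals by start, merges overlapping/adjacent intervals in one pass, and emits each merged run directly, so no set and no number-level sort are needed.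
import Mathlib
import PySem

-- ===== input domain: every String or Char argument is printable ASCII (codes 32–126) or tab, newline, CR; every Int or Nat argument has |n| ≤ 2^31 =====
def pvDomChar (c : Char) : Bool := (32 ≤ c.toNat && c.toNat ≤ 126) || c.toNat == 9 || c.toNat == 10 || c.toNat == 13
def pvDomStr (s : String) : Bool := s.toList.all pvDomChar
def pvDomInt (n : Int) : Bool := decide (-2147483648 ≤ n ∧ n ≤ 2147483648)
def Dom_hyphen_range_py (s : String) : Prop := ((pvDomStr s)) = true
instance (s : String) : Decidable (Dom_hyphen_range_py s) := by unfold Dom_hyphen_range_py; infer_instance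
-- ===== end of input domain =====

-- B replaces A's "expand every number into a set, then sort the set" by "sort the parsed
-- (lo,hi) intervals, merge overlapping/adjacent ones in one pass, emit each run"
-- (alternative decomposition; not claimed faster). A's logger.error is a side effect only
-- (and in this module a NameError, since 'logger' is undefined): those inputs are outside
-- Pre_; B simply omits the logging there.

-- x.split(sep) for a nonempty literal sep (never raises)
def pvSplit (s sep : String) : List String := (PySem.Str.split? s sep).getD []

-- ===== PORT A =====
-- A's loop body: r.add(int(t[0])) if len(t)==1 else r.update(set(range(int(t[0]), int(t[1])+1))).
-- int() failures and the logger NameError are outside Pre_, so int(·) is totalised with .getD 0.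
def pvStepA (r : PySem.Set Int) (x : String) : PySem.Set Int :=
  let t := pvSplit x "-"
  if t.length = 1 then
    PySem.Set.add r ((PySem.Int.ofStr? (PySem.List.pyGetD t 0 "")).getD 0)
  else
    PySem.Set.update r (PySem.Set.ofList
      (PySem.List.pyRange ((PySem.Int.ofStr? (PySem.List.pyGetD t 0 "")).getD 0)
        (((PySem.Int.ofStr? (PySem.List.pyGetD t 1 "")).getD 0) + 1) 1))

def hyphen_range_py (s : String) : String :=
  let s1 := PySem.Str.join "" (PySem.Str.split₀ s)
  let r : PySem.Set Int := (pvSplit s1 ",").foldl pvStepA PySem.Set.empty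
  let l := PySem.List.sorted r (fun x => x) false
  PySem.Str.join "," (l.map (fun x => PySem.Int.toStr x))

-- ===== PORT B =====
def pvParseTok (x : String) : Int × Int :=
  let t := pvSplit x "-"
  if t.length = 1 then
    let a := (PySem.Int.ofStr? (PySem.List.pyGetD t 0 "")).getD 0
    (a, a)
  else
    ((PySem.Int.ofStr? (PySem.List.pyGetD t 0 "")).getD 0,
     (PySem.Int.ofStr? (PySem.List.pyGetD t 1 "")).getD 0)

-- the merge loop of Source B: state = (merged so far, current open interval)
def pvMergeLoop : List (Int × Int) → List (Int × Int) → Option (Int × Int) →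
    List (Int × Int) × Option (Int × Int)
  | [], merged, cur => (merged, cur)
  | (a, b) :: rest, merged, cur =>
    if b < a then pvMergeLoop rest merged cur
    else
      match cur with
      | none => pvMergeLoop rest merged (some (a, b))
      | some (c, d) =>
        if a ≤ d + 1 then
          pvMergeLoop rest merged (some (c, if d < b then b else d))
        else pvMergeLoop rest (merged ++ [(c, d)]) (some (a, b))

def hyphen_range_py_alt (s : String) : String :=
  let s1 := PySem.Str.join "" (PySem.Str.split₀ s)
  let ivs := (pvSplit s1 ",").map pvParseTok
  let sivs := PySem.List.sorted ivs (fun p => p.1) false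
  let st := pvMergeLoop sivs [] none
  let merged := st.1 ++ (match st.2 with | none => [] | some p => [p])
  PySem.Str.join ","
    ((merged.flatMap (fun p => PySem.List.pyRange p.1 (p.2 + 1) 1)).map
      (fun n => PySem.Int.toStr n))

-- ===== PRECONDITION & SPEC =====
-- Pre_ excludes exactly the inputs where the Python A raises: a token with > 2 hyphen-parts
-- (NameError: 'logger' is undefined in this module) or a token whose used parts int() rejects
-- (ValueError).
def Pre_hyphen_range_py (s : String) : Prop :=
  (List.all (pvSplit (PySem.Str.join "" (PySem.Str.split₀ s)) ",") (fun x =>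
    decide ((pvSplit x "-").length ≤ 2) &&
    (PySem.Int.ofStr? (PySem.List.pyGetD (pvSplit x "-") 0 "")).isSome &&
    ((pvSplit x "-").length == 1 ||
      (PySem.Int.ofStr? (PySem.List.pyGetD (pvSplit x "-") 1 "")).isSome)) = true)

instance (s : String) : Decidable (Pre_hyphen_range_py s) := by
  unfold Pre_hyphen_range_py; infer_instance

def pvWitness_hyphen_range_py : String := "4-6,5-8,1"

def Spec_hyphen_range_py (s : String) (out : String) : Prop := out = hyphen_range_py_alt s
instance (s : String) (out : String) : Decidable (Spec_hyphen_range_py s out) := by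
  unfold Spec_hyphen_range_py; infer_instance

-- ===== CLAIM (what is proved, stated in full; the proofs are below) =====
def Claim_equal_hyphen_range_py : Prop :=
  ∀ (s : String), Dom_hyphen_range_py s → Pre_hyphen_range_py s →
    Spec_hyphen_range_py s (hyphen_range_py s)

-- ===== LEMMAS AND PROOFS =====

def pvEmit (l : List (Int × Int)) : List Int :=
  l.flatMap (fun p => PySem.List.pyRange p.1 (p.2 + 1) 1)

def pvGood (l : List (Int × Int)) : Prop :=
  l.Pairwise (fun p q => p.2 + 1 < q.1) ∧ ∀ p ∈ l, p.1 ≤ p.2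

theorem pv_mem_emit (l : List (Int × Int)) (x : Int) :
    x ∈ pvEmit l ↔ ∃ p ∈ l, p.1 ≤ x ∧ x ≤ p.2 := by
  simp only [pvEmit, List.mem_flatMap, PySem.List.mem_pyRange_one]
  constructor
  · rintro ⟨p, h1, h2, h3⟩; exact ⟨p, h1, h2, by omega⟩
  · rintro ⟨p, h1, h2, h3⟩; exact ⟨p, h1, h2, by omega⟩

theorem pv_emit_append (l m : List (Int × Int)) : pvEmit (l ++ m) = pvEmit l ++ pvEmit m := by
  simp [pvEmit]

theorem pv_emit_pairwise (l : List (Int × Int)) (h : pvGood l) :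
    (pvEmit l).Pairwise (· < ·) := by
  induction l with
  | nil => simp [pvEmit]
  | cons p t ih =>
    obtain ⟨hp, hne⟩ := h
    rw [List.pairwise_cons] at hp
    have ihp := ih ⟨hp.2, fun q hq => hne q (List.mem_cons_of_mem _ hq)⟩
    have hrw : pvEmit (p :: t) = PySem.List.pyRange p.1 (p.2 + 1) 1 ++ pvEmit t := by
      simp [pvEmit]
    rw [hrw, List.pairwise_append]
    refine ⟨PySem.List.pairwise_lt_pyRange_one _ _, ihp, ?_⟩
    intro x hx y hy
    rw [PySem.List.mem_pyRange_one] at hx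
    rw [pv_mem_emit] at hy
    obtain ⟨q, hq, hq1, hq2⟩ := hy
    have := hp.1 q hq
    omega

theorem pv_mergeLoop_spec (rest : List (Int × Int)) :
    ∀ (m : List (Int × Int)) (cur : Option (Int × Int)),
      rest.Pairwise (fun p q => p.1 ≤ q.1) →
      pvGood (m ++ cur.toList) →
      (cur = none → m = []) →
      (∀ c d, cur = some (c, d) → ∀ q ∈ rest, c ≤ q.1) →
      pvGood ((pvMergeLoop rest m cur).1 ++ (pvMergeLoop rest m cur).2.toList) ∧
      ∀ x, (x ∈ pvEmit ((pvMergeLoop rest m cur).1 ++ (pvMergeLoop rest m cur).2.toList) ↔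
            x ∈ pvEmit (m ++ cur.toList) ∨ ∃ q ∈ rest, q.1 ≤ x ∧ x ≤ q.2) := by
  induction rest with
  | nil => intro m cur _ hg _ _; exact ⟨hg, by simp [pvMergeLoop]⟩
  | cons hd tl ih =>
    rintro m cur hpw hg hnone hbound
    obtain ⟨a, b⟩ := hd
    rw [List.pairwise_cons] at hpw
    by_cases hab : b < a
    · -- empty interval: skipped
      have h := ih m cur hpw.2 hg hnone
        (fun c d hc q hq => hbound c d hc q (List.mem_cons_of_mem _ hq))
      refine ⟨by simpa [pvMergeLoop, hab] using h.1, fun x => ?_⟩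
      have h2 := h.2 x
      simp only [pvMergeLoop, if_pos hab]
      rw [h2]
      constructor
      · rintro (h | ⟨q, hq, hx⟩)
        · exact Or.inl h
        · exact Or.inr ⟨q, List.mem_cons_of_mem _ hq, hx⟩
      · rintro (h | ⟨q, hq, hx⟩)
        · exact Or.inl h
        · rcases List.mem_cons.mp hq with hq | hq
          · rw [hq] at hx; omega
          · exact Or.inr ⟨q, hq, hx⟩
    · match cur with
      | none =>
        have hm : m = [] := hnone rfl
        subst hm
        have hg' : pvGood (([] : List (Int × Int)) ++ (some (a, b)).toList) := by
          refine ⟨by simp, ?_⟩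
          intro p hp
          simp at hp
          rw [hp]; simp; omega
        have hb' : ∀ c d, some (a, b) = some (c, d) → ∀ q ∈ tl, c ≤ q.1 := by
          rintro c d h q hq; cases h; exact hpw.1 q hq
        have h := ih [] (some (a, b)) hpw.2 hg' (by simp) hb'
        refine ⟨by simpa [pvMergeLoop, hab] using h.1, fun x => ?_⟩
        have h2 := h.2 x
        simp only [pvMergeLoop, if_neg hab]
        rw [h2]
        simp only [List.nil_append, Option.toList_none, Option.toList_some]
        rw [pv_mem_emit, pv_mem_emit]
        constructor
        · rintro (⟨q, hq, hx⟩ | ⟨q, hq, hx⟩)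
          · simp at hq; rw [hq] at hx
            exact Or.inr ⟨(a, b), List.mem_cons_self, hx⟩
          · exact Or.inr ⟨q, List.mem_cons_of_mem _ hq, hx⟩
        · rintro (⟨q, hq, hx⟩ | ⟨q, hq, hx⟩)
          · simp at hq
          · rcases List.mem_cons.mp hq with hq | hq
            · rw [hq] at hx; exact Or.inl ⟨(a, b), by simp, hx⟩
            · exact Or.inr ⟨q, hq, hx⟩
      | some (c, d) =>
        have hca : c ≤ a := hbound c d rfl (a, b) List.mem_cons_self
        have hcd : c ≤ d := hg.2 (c, d) (by simp)
        by_cases hext : a ≤ d + 1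
        · -- extend the current interval
          set d' := if d < b then b else d with hd'
          have hg' : pvGood (m ++ (some (c, d')).toList) := by
            obtain ⟨hp, hne⟩ := hg
            simp only [Option.toList_some] at hp hne ⊢
            rw [List.pairwise_append] at hp
            constructor
            · rw [List.pairwise_append]
              refine ⟨hp.1, by simp, fun p hpm q hq => ?_⟩
              simp at hq
              rw [hq]
              have := hp.2.2 p hpm (c, d) (by simp)
              simpa using this
            · intro p hp'
              rcases List.mem_append.mp hp' with h | h
              · exact hne p (List.mem_append.mpr (Or.inl h))
              · simp at h; rw [h]
                show c ≤ d'
                simp only [hd']; split <;> omega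
          have hb' : ∀ c' e, some (c, d') = some (c', e) → ∀ q ∈ tl, c' ≤ q.1 := by
            rintro c' e h q hq; cases h; exact hbound c d rfl q (List.mem_cons_of_mem _ hq)
          have h := ih m (some (c, d')) hpw.2 hg' (by simp) hb'
          refine ⟨by simpa [pvMergeLoop, hab, hext] using h.1, fun x => ?_⟩
          have h2 := h.2 x
          simp only [pvMergeLoop, if_neg hab, if_pos hext]
          rw [h2]
          have hmem : x ∈ pvEmit (m ++ (some (c, d')).toList) ↔
              x ∈ pvEmit (m ++ (some (c, d)).toList) ∨ (a ≤ x ∧ x ≤ b) := by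
            simp only [Option.toList_some, pv_emit_append, List.mem_append, pv_mem_emit]
            constructor
            · rintro (h | ⟨q, hq, hx⟩)
              · exact Or.inl (Or.inl h)
              · simp at hq; rw [hq] at hx; simp at hx
                by_cases hxd : x ≤ d
                · exact Or.inl (Or.inr ⟨(c, d), by simp, hx.1, hxd⟩)
                · right
                  simp only [hd'] at hx
                  rcases hx with ⟨hx1, hx2⟩
                  split at hx2 <;> omega
            · rintro ((h | ⟨q, hq, hx⟩) | hx)
              · exact Or.inl h
              · simp at hq; rw [hq] at hx; simp at hx
                refine Or.inr ⟨(c, d'), by simp, hx.1, ?_⟩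
                simp only [hd']; split <;> omega
              · refine Or.inr ⟨(c, d'), by simp, by omega, ?_⟩
                simp only [hd']; split <;> omega
          rw [hmem]
          constructor
          · rintro ((h | hx) | ⟨q, hq, hx⟩)
            · exact Or.inl h
            · exact Or.inr ⟨(a, b), List.mem_cons_self, hx⟩
            · exact Or.inr ⟨q, List.mem_cons_of_mem _ hq, hx⟩
          · rintro (h | ⟨q, hq, hx⟩)
            · exact Or.inl (Or.inl h)
            · rcases List.mem_cons.mp hq with hq | hq
              · rw [hq] at hx; exact Or.inl (Or.inr hx)
              · exact Or.inr ⟨q, hq, hx⟩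
        · -- gap: close (c, d), open (a, b)
          have hg' : pvGood ((m ++ [(c, d)]) ++ (some (a, b)).toList) := by
            obtain ⟨hp, hne⟩ := hg
            simp only [Option.toList_some] at hp hne ⊢
            constructor
            · rw [List.pairwise_append]
              refine ⟨hp, by simp, fun p hpm q hq => ?_⟩
              simp at hq
              rw [hq]
              rcases List.mem_append.mp hpm with h | h
              · have h1 := (List.pairwise_append.mp hp).2.2 p h (c, d) (by simp)
                simp at h1 ⊢; omega
              · simp at h; rw [h]; simp; omega
            · intro p hp'
              rcases List.mem_append.mp hp' with h | h
              · exact hne p h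
              · simp at h; rw [h]; simp; omega
          have hb' : ∀ c' e, some (a, b) = some (c', e) → ∀ q ∈ tl, c' ≤ q.1 := by
            rintro c' e h q hq; cases h; exact hpw.1 q hq
          have h := ih (m ++ [(c, d)]) (some (a, b)) hpw.2 hg' (by simp) hb'
          refine ⟨by simpa [pvMergeLoop, hab, hext] using h.1, fun x => ?_⟩
          have h2 := h.2 x
          simp only [pvMergeLoop, if_neg hab, if_neg hext]
          rw [h2]
          have hre : x ∈ pvEmit ((m ++ [(c, d)]) ++ (some (a, b)).toList) ↔
              x ∈ pvEmit (m ++ (some (c, d)).toList) ∨ (a ≤ x ∧ x ≤ b) := by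
            simp only [Option.toList_some, pv_emit_append, List.mem_append, pv_mem_emit]
            constructor
            · rintro ((h | h) | ⟨q, hq, hx⟩)
              · exact Or.inl (Or.inl h)
              · exact Or.inl (Or.inr h)
              · simp at hq; rw [hq] at hx; exact Or.inr hx
            · rintro ((h | h) | hx)
              · exact Or.inl (Or.inl h)
              · exact Or.inl (Or.inr h)
              · exact Or.inr ⟨(a, b), by simp, hx⟩
          rw [hre]
          constructor
          · rintro ((h | hx) | ⟨q, hq, hx⟩)
            · exact Or.inl h
            · exact Or.inr ⟨(a, b), List.mem_cons_self, hx⟩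
            · exact Or.inr ⟨q, List.mem_cons_of_mem _ hq, hx⟩
          · rintro (h | ⟨q, hq, hx⟩)
            · exact Or.inl (Or.inl h)
            · rcases List.mem_cons.mp hq with hq | hq
              · rw [hq] at hx; exact Or.inl (Or.inr hx)
              · exact Or.inr ⟨q, hq, hx⟩

-- A's fold: membership and nodup
theorem pv_stepA_eq_add (r : PySem.Set Int) (hd : String)
    (hl : (pvSplit hd "-").length = 1) :
    pvStepA r hd = PySem.Set.add r
      ((PySem.Int.ofStr? (PySem.List.pyGetD (pvSplit hd "-") 0 "")).getD 0) := by
  simp [pvStepA, hl]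

theorem pv_stepA_eq_update (r : PySem.Set Int) (hd : String)
    (hl : ¬ (pvSplit hd "-").length = 1) :
    pvStepA r hd = PySem.Set.update r (PySem.Set.ofList
      (PySem.List.pyRange ((PySem.Int.ofStr? (PySem.List.pyGetD (pvSplit hd "-") 0 "")).getD 0)
        (((PySem.Int.ofStr? (PySem.List.pyGetD (pvSplit hd "-") 1 "")).getD 0) + 1) 1)) := by
  simp [pvStepA, hl]

theorem pv_parseTok_fst (hd : String) :
    (pvParseTok hd).1 = (PySem.Int.ofStr? (PySem.List.pyGetD (pvSplit hd "-") 0 "")).getD 0 := by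
  by_cases hl : (pvSplit hd "-").length = 1 <;> simp [pvParseTok, hl]

theorem pv_parseTok_snd_one (hd : String) (hl : (pvSplit hd "-").length = 1) :
    (pvParseTok hd).2 = (PySem.Int.ofStr? (PySem.List.pyGetD (pvSplit hd "-") 0 "")).getD 0 := by
  simp [pvParseTok, hl]

theorem pv_parseTok_snd_two (hd : String) (hl : ¬ (pvSplit hd "-").length = 1) :
    (pvParseTok hd).2 = (PySem.Int.ofStr? (PySem.List.pyGetD (pvSplit hd "-") 1 "")).getD 0 := by
  simp [pvParseTok, hl]

theorem pv_mem_foldA (toks : List String) :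
    ∀ (r : PySem.Set Int) (x : Int),
      x ∈ toks.foldl pvStepA r ↔
        x ∈ r ∨ ∃ t ∈ toks, (pvParseTok t).1 ≤ x ∧ x ≤ (pvParseTok t).2 := by
  induction toks with
  | nil => intro r x; simp
  | cons hd tl ih =>
    intro r x
    rw [List.foldl_cons, ih]
    have hstep : x ∈ pvStepA r hd ↔
        x ∈ r ∨ ((pvParseTok hd).1 ≤ x ∧ x ≤ (pvParseTok hd).2) := by
      by_cases hl : (pvSplit hd "-").length = 1
      · rw [pv_stepA_eq_add r hd hl, PySem.Set.mem_add, pv_parseTok_fst hd,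
          pv_parseTok_snd_one hd hl]
        generalize (PySem.Int.ofStr? (PySem.List.pyGetD (pvSplit hd "-") 0 "")).getD 0 = v
        constructor
        · rintro (h | h)
          · exact Or.inl h
          · exact Or.inr (by omega)
        · rintro (h | ⟨h1, h2⟩)
          · exact Or.inl h
          · exact Or.inr (by omega)
      · rw [pv_stepA_eq_update r hd hl, PySem.Set.mem_update, pv_parseTok_fst hd,
          pv_parseTok_snd_two hd hl]
        simp only [PySem.Set.mem_ofList, PySem.List.mem_pyRange_one]
        generalize (PySem.Int.ofStr? (PySem.List.pyGetD (pvSplit hd "-") 0 "")).getD 0 = v0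
        generalize (PySem.Int.ofStr? (PySem.List.pyGetD (pvSplit hd "-") 1 "")).getD 0 = v1
        constructor
        · rintro (h | ⟨h1, h2⟩)
          · exact Or.inl h
          · exact Or.inr (by omega)
        · rintro (h | ⟨h1, h2⟩)
          · exact Or.inl h
          · exact Or.inr (by omega)
    rw [hstep]
    constructor
    · rintro ((h | hx) | ⟨t, ht, hx⟩)
      · exact Or.inl h
      · exact Or.inr ⟨hd, List.mem_cons_self, hx⟩
      · exact Or.inr ⟨t, List.mem_cons_of_mem _ ht, hx⟩
    · rintro (h | ⟨t, ht, hx⟩)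
      · exact Or.inl (Or.inl h)
      · rcases List.mem_cons.mp ht with ht | ht
        · rw [ht] at hx; exact Or.inl (Or.inr hx)
        · exact Or.inr ⟨t, ht, hx⟩

theorem pv_nodup_foldA (toks : List String) :
    ∀ (r : PySem.Set Int), r.Nodup → (toks.foldl pvStepA r).Nodup := by
  induction toks with
  | nil => intro r h; simpa using h
  | cons hd tl ih =>
    intro r h
    rw [List.foldl_cons]
    apply ih
    simp only [pvStepA]
    split
    · exact PySem.Set.nodup_add _ _ h
    · exact PySem.Set.nodup_update _ _ h

-- two strictly increasing Int lists with the same members are equal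
theorem pv_pairwiseLt_ext (l1 : List Int) :
    ∀ (l2 : List Int), l1.Pairwise (· < ·) → l2.Pairwise (· < ·) →
      (∀ x, x ∈ l1 ↔ x ∈ l2) → l1 = l2 := by
  induction l1 with
  | nil =>
    intro l2 _ _ hmem
    cases l2 with
    | nil => rfl
    | cons b t => exact absurd ((hmem b).mpr List.mem_cons_self) (by simp)
  | cons a t1 ih =>
    intro l2 h1 h2 hmem
    cases l2 with
    | nil => exact absurd ((hmem a).mp List.mem_cons_self) (by simp)
    | cons b t2 =>
      rw [List.pairwise_cons] at h1 h2
      have hab : a = b := by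
        have ha := (hmem a).mp List.mem_cons_self
        have hb := (hmem b).mpr List.mem_cons_self
        rcases List.mem_cons.mp ha with ha | ha
        · exact ha
        · rcases List.mem_cons.mp hb with hb | hb
          · exact hb.symm
          · have h3 := h1.1 b hb
            have h4 := h2.1 a ha
            omega
      subst hab
      have htails : t1 = t2 := by
        apply ih t2 h1.2 h2.2
        intro x
        constructor
        · intro hx
          have h3 := h1.1 x hx
          rcases List.mem_cons.mp ((hmem x).mp (List.mem_cons_of_mem _ hx)) with h | h
          · omega
          · exact h
        · intro hx
          have h3 := h2.1 x hx
          rcases List.mem_cons.mp ((hmem x).mpr (List.mem_cons_of_mem _ hx)) with h | h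
          · omega
          · exact h
      rw [htails]

-- the central equality: the two ports agree on EVERY string
theorem pv_ports_agree (s : String) : hyphen_range_py s = hyphen_range_py_alt s := by
  simp only [hyphen_range_py, hyphen_range_py_alt]
  set toks := pvSplit (PySem.Str.join "" (PySem.Str.split₀ s)) "," with htoks
  set r := toks.foldl pvStepA PySem.Set.empty with hr
  set lA := PySem.List.sorted r (fun x => x) false with hlA
  set ivs := toks.map pvParseTok with hivs
  set sivs := PySem.List.sorted ivs (fun p => p.1) false with hsivs
  set st := pvMergeLoop sivs [] none with hst
  set merged := st.1 ++ (match st.2 with | none => [] | some p => [p]) with hmerged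
  have hmerged' : merged = st.1 ++ st.2.toList := by
    rw [hmerged]; cases st.2 <;> rfl
  suffices h : lA = pvEmit merged by
    rw [show merged.flatMap (fun p => PySem.List.pyRange p.1 (p.2 + 1) 1) = pvEmit merged from rfl,
      ← h]
  -- merge-loop facts
  have hspw : sivs.Pairwise (fun p q => p.1 ≤ q.1) := PySem.List.sorted_pairwise ivs _
  have hml := pv_mergeLoop_spec sivs [] none hspw
    ⟨by simp, by simp⟩ (fun _ => rfl) (by rintro c d h; cases h)
  rw [← hst] at hml
  have hgood : pvGood merged := by rw [hmerged']; exact hml.1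
  -- A-side order facts
  have hnr : r.Nodup := pv_nodup_foldA toks [] List.nodup_nil
  have hperm : lA.Perm r := PySem.List.sorted_perm r _ _
  have hlt1 : lA.Pairwise (· < ·) := by
    have hle : lA.Pairwise (· ≤ ·) := by
      simpa using PySem.List.sorted_pairwise r (fun x : Int => x)
    have hnd : lA.Nodup := hperm.nodup_iff.mpr hnr
    exact List.Pairwise.imp₂ (fun a b hab hne => lt_of_le_of_ne hab hne) hle hnd
  have hlt2 : (pvEmit merged).Pairwise (· < ·) := pv_emit_pairwise merged hgood
  apply pv_pairwiseLt_ext lA (pvEmit merged) hlt1 hlt2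
  intro x
  have hxA : x ∈ lA ↔ ∃ t ∈ toks, (pvParseTok t).1 ≤ x ∧ x ≤ (pvParseTok t).2 := by
    rw [hlA, PySem.List.mem_sorted, hr, pv_mem_foldA]
    simp
  have hxB : x ∈ pvEmit merged ↔ ∃ t ∈ toks, (pvParseTok t).1 ≤ x ∧ x ≤ (pvParseTok t).2 := by
    rw [hmerged', hml.2 x]
    have hnilemit : (x ∈ pvEmit (([] : List (Int × Int)) ++ Option.toList none)) = False := by
      simp [pvEmit]
    rw [hnilemit]
    simp only [false_or]
    constructor
    · rintro ⟨q, hq, hx⟩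
      rw [hsivs, PySem.List.mem_sorted, hivs, List.mem_map] at hq
      obtain ⟨t, ht, hqt⟩ := hq
      refine ⟨t, ht, ?_⟩
      rw [hqt]
      exact hx
    · rintro ⟨t, ht, hx⟩
      refine ⟨pvParseTok t, ?_, hx⟩
      rw [hsivs, PySem.List.mem_sorted, hivs, List.mem_map]
      exact ⟨t, ht, rfl⟩
  rw [hxA, hxB]

-- ===== VERDICT (by name: the statement is the Claim_ definition above) =====
theorem hyphen_range_py_spec : Claim_equal_hyphen_range_py := by
  intro s _ _
  exact pv_ports_agree s
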